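-- pv_equiv track=rewrite | github.com/guotielong/a2a-samples | samples/python/agents/a2a_mcp/examples/run_orchestrated_demo.py | guess_paths_from_openapi
-- ===== SOURCE A (Python) =====
-- from typing import Any, Awaitable, Callable, Dict, List, Optional
--
-- def guess_paths_from_openapi(spec: Dict[str, Any]) -> tuple[str | None, str | None]:
--     execute = None
--     status_fmt = None
--     paths = spec.get("paths", {})
--     for p, meta in paths.items():
--         lower = p.lower()
--         if execute is None and any(k in lower for k in ["execute", "task"]):
--             if "post" in meta:
--                 execute = p
--         if status_fmt is None and "{task_id}" in p:
--             status_fmt = p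
--     return execute, status_fmt
-- ===== SOURCE B (Python) =====
-- def guess_paths_from_openapi(spec):
--     paths = spec.get("paths", {})
--     execute = next(
--         (p for p, meta in paths.items()
--          if "post" in meta and any(k in p.lower() for k in ("execute", "task"))),
--         None,
--     )
--     status_fmt = next((p for p in paths if "{task_id}" in p), None)
--     return execute, status_fmt
-- ===== Notes on version B (the rewrite author's own statement) =====
-- stated objective: simpler
-- what changed: Replaced the single flag-guarded loop carrying two sentinel variables with two independent first-match searches (next(...) with a None default) over the paths dict.
import Mathlib
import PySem

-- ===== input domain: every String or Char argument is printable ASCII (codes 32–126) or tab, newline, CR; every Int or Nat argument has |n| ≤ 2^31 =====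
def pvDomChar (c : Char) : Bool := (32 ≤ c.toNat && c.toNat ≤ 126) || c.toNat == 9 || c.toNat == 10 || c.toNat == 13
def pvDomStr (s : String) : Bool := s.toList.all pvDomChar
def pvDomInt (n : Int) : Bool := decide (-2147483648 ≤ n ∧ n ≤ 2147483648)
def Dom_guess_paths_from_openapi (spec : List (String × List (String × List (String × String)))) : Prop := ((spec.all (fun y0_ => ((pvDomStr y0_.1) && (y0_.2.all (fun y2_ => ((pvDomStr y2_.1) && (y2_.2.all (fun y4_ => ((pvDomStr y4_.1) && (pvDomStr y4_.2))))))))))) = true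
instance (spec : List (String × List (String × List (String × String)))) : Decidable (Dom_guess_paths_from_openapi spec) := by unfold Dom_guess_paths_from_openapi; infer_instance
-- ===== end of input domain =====

-- B replaces A's single flag-guarded loop (two sentinel variables) by two independent
-- first-match searches; objective: simpler. Return-value equivalence; neither mutates its argument.

-- ===== PORT A =====
-- literal transliteration of A: one pass over paths, carrying the pair (execute, status_fmt)
def guess_paths_from_openapi (spec : List (String × List (String × List (String × String)))) : Option String × Option String :=
  let paths := (PySem.Dict.mk spec).getD "paths" []
  paths.foldl
    (fun (st : Option String × Option String) pm =>
      let p := pm.1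
      let metaD := pm.2
      let lower := PySem.Str.lower p
      let execute :=
        if st.1 = none ∧ (PySem.Str.isIn "execute" lower || PySem.Str.isIn "task" lower) then
          (if (PySem.Dict.mk metaD).contains "post" then some p else st.1)
        else st.1
      let status_fmt :=
        if st.2 = none ∧ PySem.Str.isIn "{task_id}" p then some p else st.2
      (execute, status_fmt))
    (none, none)

-- ===== PORT B =====
-- literal transliteration of B: two independent first-match searches (next(..., None) = List.find?)
def guess_paths_from_openapi_alt (spec : List (String × List (String × List (String × String)))) : Option String × Option String :=
  let paths := (PySem.Dict.mk spec).getD "paths" []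
  let execute :=
    (paths.find? (fun pm =>
      (PySem.Dict.mk pm.2).contains "post" &&
        (PySem.Str.isIn "execute" (PySem.Str.lower pm.1) || PySem.Str.isIn "task" (PySem.Str.lower pm.1)))).map (·.1)
  let status_fmt := (paths.find? (fun pm => PySem.Str.isIn "{task_id}" pm.1)).map (·.1)
  (execute, status_fmt)

-- ===== PRECONDITION & SPEC =====
def Spec_guess_paths_from_openapi (spec : List (String × List (String × List (String × String)))) (out : Option String × Option String) : Prop := out = guess_paths_from_openapi_alt spec
instance (spec : List (String × List (String × List (String × String)))) (out : Option String × Option String) : Decidable (Spec_guess_paths_from_openapi spec out) := by unfold Spec_guess_paths_from_openapi; infer_instance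

-- ===== CLAIM (what is proved, stated in full; the proofs are below) =====
def Claim_equal_guess_paths_from_openapi : Prop := ∀ (spec : List (String × List (String × List (String × String)))), Dom_guess_paths_from_openapi spec → Spec_guess_paths_from_openapi spec (guess_paths_from_openapi spec)

-- ===== LEMMAS AND PROOFS =====

-- A's loop computes, from any start state, each component as "keep it if already set,
-- else the first match" — proved by induction with the accumulator generalized.
theorem foldl_pair_first_match
    (l : List (String × List (String × String))) (e s : Option String) :
    l.foldl
      (fun (st : Option String × Option String) pm =>
        let p := pm.1
        let metaD := pm.2
        let lower := PySem.Str.lower p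
        let execute :=
          if st.1 = none ∧ (PySem.Str.isIn "execute" lower || PySem.Str.isIn "task" lower) then
            (if (PySem.Dict.mk metaD).contains "post" then some p else st.1)
          else st.1
        let status_fmt :=
          if st.2 = none ∧ PySem.Str.isIn "{task_id}" p then some p else st.2
        (execute, status_fmt))
      (e, s)
    = ((if e.isSome then e else
          (l.find? (fun pm =>
            (PySem.Dict.mk pm.2).contains "post" &&
              (PySem.Str.isIn "execute" (PySem.Str.lower pm.1) || PySem.Str.isIn "task" (PySem.Str.lower pm.1)))).map (·.1)),
       (if s.isSome then s else
          (l.find? (fun pm => PySem.Str.isIn "{task_id}" pm.1)).map (·.1))) := by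
  induction l generalizing e s with
  | nil => cases e <;> cases s <;> simp
  | cons hd tl ih =>
    simp only [List.foldl_cons, ih, List.find?_cons]
    clear ih
    cases hp : (PySem.Dict.mk hd.2).contains "post" <;>
    cases hk : (PySem.Str.isIn "execute" (PySem.Str.lower hd.1) || PySem.Str.isIn "task" (PySem.Str.lower hd.1)) <;>
    cases hs : PySem.Str.isIn "{task_id}" hd.1 <;>
    cases e <;> cases s <;>
    simp only [hp, hk, hs] <;> simp

-- ===== VERDICT (by name: the statement is the Claim_ definition above) =====
theorem guess_paths_from_openapi_spec : Claim_equal_guess_paths_from_openapi := by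
  intro spec _
  unfold Spec_guess_paths_from_openapi guess_paths_from_openapi guess_paths_from_openapi_alt
  simp only [foldl_pair_first_match, Option.isSome_none, Bool.false_eq_true, if_false]
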